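-- pv_equiv track=rewrite | github.com/awun0105/AIO2024-Excercise | Module1/Week1/choose_three_regression_loss_function.py | loss_rmse
-- ===== SOURCE A (Python) =====
-- def loss_rmse(n,target,predict):
--     total_squared_error = 0
--     y = target
--     y_hat = predict
--     for i in range(n):
--         squared_error = (y - y_hat)**2
--         total_squared_error = total_squared_error + squared_error
--     return total_squared_error
-- ===== SOURCE B (Python) =====
-- def loss_rmse(n, target, predict):
--     # closed form: each of the n iterations adds the same squared error,
--     # so multiply once; range(n) is empty when n <= 0, hence the guard.
--     if n <= 0:
--         return 0
--     diff = target - predict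
--     return n * diff * diff
-- ===== Notes on version B (the rewrite author's own statement) =====
-- stated objective: faster
-- what changed: Replaced the loop adding the identical squared error n times with a guarded closed form n*diff*diff (0 when n<=0).
import Mathlib
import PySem

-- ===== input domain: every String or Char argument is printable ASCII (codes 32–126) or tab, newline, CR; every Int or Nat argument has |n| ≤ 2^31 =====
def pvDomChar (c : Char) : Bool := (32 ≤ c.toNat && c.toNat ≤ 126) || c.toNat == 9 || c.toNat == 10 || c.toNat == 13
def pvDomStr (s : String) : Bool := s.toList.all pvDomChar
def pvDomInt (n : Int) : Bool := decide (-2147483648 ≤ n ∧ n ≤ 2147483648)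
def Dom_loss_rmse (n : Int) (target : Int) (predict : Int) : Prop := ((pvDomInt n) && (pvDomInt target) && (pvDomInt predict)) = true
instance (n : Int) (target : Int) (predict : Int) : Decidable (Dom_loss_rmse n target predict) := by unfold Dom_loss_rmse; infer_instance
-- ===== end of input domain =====

-- B replaces the n-iteration loop of identical additions by a guarded closed form n*diff*diff (asymptotically faster).


-- ===== PORT A =====
-- loop: for i in range(n): total_squared_error += (y - y_hat)**2
def loss_rmse (n : Int) (target : Int) (predict : Int) : Int :=
  (PySem.List.pyRange 0 n 1).foldl
    (fun total_squared_error _i => total_squared_error + (target - predict) ^ 2) 0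

-- ===== PORT B =====
-- guarded closed form: 0 if n <= 0 else n * diff * diff
def loss_rmse_alt (n : Int) (target : Int) (predict : Int) : Int :=
  if n ≤ 0 then 0
  else
    let diff := target - predict
    n * diff * diff

-- ===== PRECONDITION & SPEC =====
def Spec_loss_rmse (n : Int) (target : Int) (predict : Int) (out : Int) : Prop := out = loss_rmse_alt n target predict
instance (n : Int) (target : Int) (predict : Int) (out : Int) : Decidable (Spec_loss_rmse n target predict out) := by unfold Spec_loss_rmse; infer_instance

-- ===== CLAIM (what is proved, stated in full; the proofs are below) =====
def Claim_equal_loss_rmse : Prop := ∀ (n : Int) (target : Int) (predict : Int), Dom_loss_rmse n target predict → Spec_loss_rmse n target predict (loss_rmse n target predict)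

-- ===== LEMMAS AND PROOFS =====
-- folding "+ c" over a list adds length * c
theorem foldl_add_const (c : Int) (l : List Int) (acc : Int) :
    l.foldl (fun a (_ : Int) => a + c) acc = acc + l.length * c := by
  induction l generalizing acc with
  | nil => simp
  | cons x xs ih => simp [List.foldl, ih]; ring

-- ===== VERDICT (by name: the statement is the Claim_ definition above) =====
theorem loss_rmse_spec : Claim_equal_loss_rmse := by
  intro n target predict _
  unfold Spec_loss_rmse loss_rmse loss_rmse_alt
  rw [foldl_add_const]
  have hlen : ((PySem.List.pyRange 0 n 1).length : Int) = n.toNat := by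
    simp [pysem]
  rw [hlen]
  split_ifs with h
  · simp [Int.toNat_of_nonpos h]
  · push_neg at h
    rw [Int.toNat_of_nonneg (le_of_lt h)]
    ring
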